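-- pv_equiv track=rewrite | github.com/Kevinasd12/hack_python_2 | hack_6.py | fn_hack_6
-- ===== SOURCE A (Python) =====
-- def fn_hack_6(s):
--     result = s
--     ls = []
--     conteo = 1
--     if len(result) == 0:
--         ls = ["0"]
--     for recorre in result:
--         ls.append(recorre)
--         par_impar = len(ls) % 2
--         if par_impar == 1:
--             ls[-1] = str(conteo)
--             conteo += 2
--         elif par_impar == 0:
--             ls[-1] = "-"
--     result = ls
--     return result
-- ===== SOURCE B (Python) =====
-- def fn_hack_6(s):
--     n = len(s)
--     if n == 0:
--         return ["0"]
--     # staged construction: build ceil(n/2) (odd-number, dash) pairs,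
--     # flatten them, then truncate to length n
--     pairs = [[str(2 * k + 1), "-"] for k in range((n + 1) // 2)]
--     flat = [x for p in pairs for x in p]
--     return flat[:n]
-- ===== Notes on version B (the rewrite author's own statement) =====
-- stated objective: alternative
-- what changed: Replaces A's single pass over the characters with a running conteo accumulator and append-then-overwrite-last pattern by staged passes: build ceil(n/2) (odd-number, dash) pairs, flatten them, and truncate the flattened list to length n.
import Mathlib
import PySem

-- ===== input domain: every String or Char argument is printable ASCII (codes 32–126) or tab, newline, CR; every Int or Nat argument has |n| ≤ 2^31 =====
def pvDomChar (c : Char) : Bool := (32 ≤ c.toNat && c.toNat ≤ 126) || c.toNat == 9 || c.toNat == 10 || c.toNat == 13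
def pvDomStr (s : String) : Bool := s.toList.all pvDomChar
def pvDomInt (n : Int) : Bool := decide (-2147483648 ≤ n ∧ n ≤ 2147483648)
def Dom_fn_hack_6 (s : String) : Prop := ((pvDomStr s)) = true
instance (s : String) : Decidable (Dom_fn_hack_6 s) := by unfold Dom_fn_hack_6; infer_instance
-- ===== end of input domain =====

-- B replaces A's character loop (running accumulator `conteo`, append-then-overwrite-last)
-- by staged passes: build ceil(n/2) (odd-number, dash) pairs, flatten, truncate to n (alternative).

-- ===== PORT A =====
-- one loop step of A: append the char, then overwrite ls[-1] according to len(ls) % 2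
def fn_hack_6_step (st : List String × Int) (c : Char) : List String × Int :=
  let ls2 := st.1 ++ [String.ofList [c]]
  let par_impar := ls2.length % 2
  if par_impar = 1 then (ls2.dropLast ++ [PySem.Int.toStr st.2], st.2 + 2)
  else if par_impar = 0 then (ls2.dropLast ++ ["-"], st.2)
  else (ls2, st.2)

def fn_hack_6 (s : String) : List String :=
  let result := s.toList
  let ls : List String := if result.length = 0 then ["0"] else []
  (result.foldl fn_hack_6_step (ls, 1)).1

-- ===== PORT B =====
def fn_hack_6_alt (s : String) : List String :=
  let n := s.toList.length
  if n = 0 then ["0"]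
  else
    let pairs := (List.range ((n + 1) / 2)).map
      (fun (k : Nat) => [PySem.Int.toStr (2 * (k : Int) + 1), "-"])
    let flat := pairs.flatMap id
    flat.take n

-- ===== PRECONDITION & SPEC =====
def Spec_fn_hack_6 (s : String) (out : List String) : Prop := out = fn_hack_6_alt s
instance (s : String) (out : List String) : Decidable (Spec_fn_hack_6 s out) := by unfold Spec_fn_hack_6; infer_instance

-- ===== CLAIM (what is proved, stated in full; the proofs are below) =====
def Claim_equal_fn_hack_6 : Prop := ∀ (s : String), Dom_fn_hack_6 s → Spec_fn_hack_6 s (fn_hack_6 s)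

-- ===== LEMMAS AND PROOFS =====

def pvF : Nat → String := fun i => if i % 2 = 0 then PySem.Int.toStr ((i : Int) + 1) else "-"

theorem fn_hack_6_step_eq (c : Char) (k : Nat) :
    fn_hack_6_step ((List.range k).map pvF, (((k + 1) / 2 * 2 + 1 : Nat) : Int)) c =
      ((List.range (k + 1)).map pvF, (((k + 2) / 2 * 2 + 1 : Nat) : Int)) := by
  unfold fn_hack_6_step
  simp only [List.length_append, List.length_map, List.length_range, List.length_cons,
    List.length_nil, List.dropLast_concat, List.range_succ, List.map_append]
  rcases Nat.even_or_odd k with ⟨m, hm⟩ | ⟨m, hm⟩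
  · have h1 : (k + 1) % 2 = 1 := by omega
    have h2 : (k + 1) / 2 * 2 + 1 = k + 1 := by omega
    have hk : k % 2 = 0 := by omega
    rw [if_pos h1, Prod.mk.injEq]
    refine ⟨?_, by omega⟩
    rw [h2]
    simp only [List.map_cons, List.map_nil, pvF, hk, if_pos, List.append_cancel_left_eq,
      List.cons.injEq, and_true]
    congr 1
  · have h1 : (k + 1) % 2 = 0 := by omega
    have hk : k % 2 = 1 := by omega
    rw [if_neg (by omega), if_pos h1, Prod.mk.injEq]
    refine ⟨?_, by omega⟩
    simp [pvF, hk]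

theorem fn_hack_6_loop (cs : List Char) : ∀ (k : Nat),
    cs.foldl fn_hack_6_step ((List.range k).map pvF, (((k + 1) / 2 * 2 + 1 : Nat) : Int)) =
      ((List.range (k + cs.length)).map pvF, ((((k + cs.length) + 1) / 2 * 2 + 1 : Nat) : Int)) := by
  induction cs with
  | nil => intro k; simp
  | cons c cs ih =>
    intro k
    rw [List.foldl_cons, fn_hack_6_step_eq c k, ih (k + 1)]
    have hkk : k + 1 + cs.length = k + (c :: cs).length := by simp; omega
    rw [hkk]

-- the flattened pair list is exactly pvF over the first 2*m indices
theorem fn_hack_6_pairs (m : Nat) :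
    ((List.range m).map (fun (k : Nat) => [PySem.Int.toStr (2 * (k : Int) + 1), "-"])).flatMap id =
      (List.range (2 * m)).map pvF := by
  induction m with
  | zero => simp
  | succ m ih =>
    rw [List.range_succ, List.map_append, List.flatMap_append, ih]
    have h2 : 2 * (m + 1) = 2 * m + 1 + 1 := by omega
    rw [h2, List.range_succ, List.range_succ, List.map_append, List.map_append]
    simp only [List.map_cons, List.map_nil, List.flatMap_cons, List.flatMap_nil, id]
    have he : pvF (2 * m) = PySem.Int.toStr (2 * (m : Int) + 1) := by
      unfold pvF
      rw [if_pos (by omega)]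
      congr 1
    have ho : pvF (2 * m + 1) = "-" := by
      unfold pvF
      rw [if_neg (by omega)]
    rw [he, ho]
    simp

-- ===== VERDICT (by name: the statement is the Claim_ definition above) =====
theorem fn_hack_6_spec : Claim_equal_fn_hack_6 := by
  intro s _
  unfold Spec_fn_hack_6
  cases h : s.toList with
  | nil =>
    unfold fn_hack_6 fn_hack_6_alt
    simp [h]
  | cons c cs =>
    have hne : s.toList.length ≠ 0 := by rw [h]; simp
    unfold fn_hack_6 fn_hack_6_alt
    simp only [if_neg hne]
    rw [fn_hack_6_pairs]
    have key := fn_hack_6_loop s.toList 0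
    simp only [List.range_zero, List.map_nil, Nat.zero_add,
      show ((0 + 1) / 2 * 2 + 1 : Nat) = 1 from by norm_num, Nat.cast_one] at key
    rw [key, ← List.map_take, List.take_range]
    have hm : min s.toList.length (2 * ((s.toList.length + 1) / 2)) = s.toList.length := by omega
    rw [hm]
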